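-- pv_equiv track=rewrite | github.com/Alina-Goova/Practicum | Games/мостики.py | prs
-- ===== SOURCE A (Python) =====
-- t=['|', '-']
--
-- def prm1(x1, y1, w, a):
--     if x1<0 or x1>6 or y1<0 or y1>6 or a[x1][y1]!='['+t[(x1+1)%2]+']':
--         return False
--     if y1==6:
--         return True
--     if prm1(x1+1, y1+1, w, a):
--         return True
--     if prm1(x1-1, y1+1, w, a):
--         return True
--     if prm1(x1, y1+2, w, a):
--         return True
--     return False
--
-- def prm2(x1, y1, w, a):
--     if x1<0 or x1>6 or y1<0 or y1>6 or a[x1][y1]!='['+t[x1%2]+']':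
--         return False
--     if x1==6:
--         return True
--     if prm2(x1+1, y1+1, w, a):
--         return True
--     if prm2(x1+1, y1-1, w, a):
--         return True
--     if prm2(x1+2, y1, w, a):
--         return True
--     return False
--
-- def prs(w, a):
--     if w==1:
--         for i in range(7):
--             if a[0][i]=='[-]':
--                 if prm1(0, i, w, a):
--                     return True
--     if w==2:
--         for i in range(7):
--             if a[i][0]=='[|]':
--                 if prm2(i, 0, w, a):
--                     return True
--     return False
-- ===== SOURCE B (Python) =====
-- t = ['|', '-']
--
-- def prs(w, a):
--     # Iterative DFS with an explicit stack instead of the two recursive path-finders.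
--     if w == 1:
--         stack = [(0, i) for i in range(7) if a[0][i] == '[-]']
--         while stack:
--             x, y = stack.pop()
--             if x < 0 or x > 6 or y < 0 or y > 6:
--                 continue
--             if a[x][y] != '[' + t[(x + 1) % 2] + ']':
--                 continue
--             if y == 6:
--                 return True
--             stack += [(x + 1, y + 1), (x - 1, y + 1), (x, y + 2)]
--         return False
--     if w == 2:
--         stack = [(i, 0) for i in range(7) if a[i][0] == '[|]']
--         while stack:
--             x, y = stack.pop()
--             if x < 0 or x > 6 or y < 0 or y > 6:
--                 continue
--             if a[x][y] != '[' + t[x % 2] + ']':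
--                 continue
--             if x == 6:
--                 return True
--             stack += [(x + 1, y + 1), (x + 1, y - 1), (x + 2, y)]
--         return False
--     return False
-- ===== Notes on version B (the rewrite author's own statement) =====
-- stated objective: alternative
-- what changed: The two recursive depth-first path-finders prm1/prm2 are replaced by a single iterative depth-first search per direction using an explicit stack of (x,y) cells, with validity/character checks applied when a cell is popped; correctness relies on y (resp. x) strictly increasing along pushes.
import Mathlib
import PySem

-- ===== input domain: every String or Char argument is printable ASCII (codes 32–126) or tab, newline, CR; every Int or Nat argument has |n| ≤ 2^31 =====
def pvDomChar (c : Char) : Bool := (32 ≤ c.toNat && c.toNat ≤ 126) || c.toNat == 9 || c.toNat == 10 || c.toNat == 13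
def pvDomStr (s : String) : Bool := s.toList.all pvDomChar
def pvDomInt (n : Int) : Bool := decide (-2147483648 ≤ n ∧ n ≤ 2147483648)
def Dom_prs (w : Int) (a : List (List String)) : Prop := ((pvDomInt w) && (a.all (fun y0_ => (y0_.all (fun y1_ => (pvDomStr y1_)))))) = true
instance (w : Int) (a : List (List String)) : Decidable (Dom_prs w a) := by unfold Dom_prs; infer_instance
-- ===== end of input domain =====

-- B replaces the two recursive path-finders by one explicit-stack iterative DFS per direction (alternative decomposition, same cost).


-- ===== PORT A =====
-- t = ['|', '-']
def tlist : List String := ["|", "-"]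

-- a[x][y]; total with default "" — exact under Pre_prs, where every accessed cell is in range
def cell (a : List (List String)) (x y : Int) : String :=
  (PySem.List.pyGetD (PySem.List.pyGetD a x []) y "")

-- expected character '['+t[(x1+1)%2]+']'  (prm1)  resp.  '['+t[x1%2]+']'  (prm2)
def exp1 (x : Int) : String := "[" ++ (PySem.List.pyGetD tlist (PySem.Int.mod (x + 1) 2) "") ++ "]"
def exp2 (x : Int) : String := "[" ++ (PySem.List.pyGetD tlist (PySem.Int.mod x 2) "") ++ "]"

-- A's recursive prm1, with a fuel argument as a totality device only: y1 grows by ≥ 1 per call and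
-- the guard stops at y1 > 6, so the recursion depth is at most 8 and fuel 16 is never exhausted
def prm1F : Nat → Int → Int → Int → List (List String) → Bool
  | 0, _, _, _, _ => false
  | k + 1, x1, y1, w, a =>
    if x1 < 0 ∨ x1 > 6 ∨ y1 < 0 ∨ y1 > 6 ∨ cell a x1 y1 ≠ exp1 x1 then false
    else if y1 == 6 then true
    else if prm1F k (x1 + 1) (y1 + 1) w a then true
    else if prm1F k (x1 - 1) (y1 + 1) w a then true
    else if prm1F k x1 (y1 + 2) w a then true
    else false

def prm1 (x1 y1 w : Int) (a : List (List String)) : Bool := prm1F 16 x1 y1 w a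

def prm2F : Nat → Int → Int → Int → List (List String) → Bool
  | 0, _, _, _, _ => false
  | k + 1, x1, y1, w, a =>
    if x1 < 0 ∨ x1 > 6 ∨ y1 < 0 ∨ y1 > 6 ∨ cell a x1 y1 ≠ exp2 x1 then false
    else if x1 == 6 then true
    else if prm2F k (x1 + 1) (y1 + 1) w a then true
    else if prm2F k (x1 + 1) (y1 - 1) w a then true
    else if prm2F k (x1 + 2) y1 w a then true
    else false

def prm2 (x1 y1 w : Int) (a : List (List String)) : Bool := prm2F 16 x1 y1 w a

def prs (w : Int) (a : List (List String)) : Bool :=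
  if w == 1 && (PySem.List.pyRange 0 7 1).any (fun i => cell a 0 i == "[-]" && prm1 0 i w a) then
    true
  else if w == 2 && (PySem.List.pyRange 0 7 1).any (fun i => cell a i 0 == "[|]" && prm2 i 0 w a) then
    true
  else false

-- ===== PORT B =====
-- decreasing measure of the DFS stack: y (resp. x) strictly grows along pushes, so popping one cell
-- and pushing its three successors strictly shrinks the sum of 4^(9-y) (resp. 4^(9-x))
def meas1 (s : List (Int × Int)) : Nat := (s.map (fun p => 4 ^ (9 - p.2).toNat)).sum
def meas2 (s : List (Int × Int)) : Nat := (s.map (fun p => 4 ^ (9 - p.1).toNat)).sum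

-- Source B's while loop; the Lean stack holds the Python list reversed (head = top = next pop); the
-- fuel counts loop iterations and is a totality device only (meas1 of the stack shrinks each step)
def loopF1 (w : Int) (a : List (List String)) : Nat → List (Int × Int) → Bool
  | _, [] => false
  | 0, _ :: _ => false
  | fuel + 1, (x, y) :: rest =>
    if x < 0 ∨ x > 6 ∨ y < 0 ∨ y > 6 then loopF1 w a fuel rest
    else if cell a x y ≠ exp1 x then loopF1 w a fuel rest
    else if y == 6 then true
    else loopF1 w a fuel ((x, y + 2) :: (x - 1, y + 1) :: (x + 1, y + 1) :: rest)

def loopF2 (w : Int) (a : List (List String)) : Nat → List (Int × Int) → Bool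
  | _, [] => false
  | 0, _ :: _ => false
  | fuel + 1, (x, y) :: rest =>
    if x < 0 ∨ x > 6 ∨ y < 0 ∨ y > 6 then loopF2 w a fuel rest
    else if cell a x y ≠ exp2 x then loopF2 w a fuel rest
    else if x == 6 then true
    else loopF2 w a fuel ((x + 2, y) :: (x + 1, y - 1) :: (x + 1, y + 1) :: rest)

def prs_alt (w : Int) (a : List (List String)) : Bool :=
  if w == 1 then
    let stack := (((PySem.List.pyRange 0 7 1).filter (fun i => cell a 0 i == "[-]")).map
      (fun i => ((0 : Int), i))).reverse
    loopF1 w a (meas1 stack + 1) stack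
  else if w == 2 then
    let stack := (((PySem.List.pyRange 0 7 1).filter (fun i => cell a i 0 == "[|]")).map
      (fun i => (i, (0 : Int)))).reverse
    loopF2 w a (meas2 stack + 1) stack
  else false

-- ===== PRECONDITION & SPEC =====
-- Pre_ excludes, for w ∈ {1,2}, boards lacking the natural full 7×7 shape: there A can hit an
-- out-of-range access (IndexError); on a few such boards A happens to return before the bad
-- access (see claim.json cites) and B returns the same value there.
def Pre_prs (w : Int) (a : List (List String)) : Prop :=
  (w = 1 ∨ w = 2) → (7 ≤ a.length ∧ ∀ row ∈ a.take 7, 7 ≤ row.length)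
instance (w : Int) (a : List (List String)) : Decidable (Pre_prs w a) := by
  unfold Pre_prs; infer_instance

def pvWitness_prs : Int × List (List String) :=
  (1, [["[-]", "x", "x", "x", "x", "x", "x"],
       ["x", "x", "x", "x", "x", "x", "x"],
       ["x", "x", "x", "x", "x", "x", "x"],
       ["x", "x", "x", "x", "x", "x", "x"],
       ["x", "x", "x", "x", "x", "x", "x"],
       ["x", "x", "x", "x", "x", "x", "x"],
       ["x", "x", "x", "x", "x", "x", "x"]])

def Spec_prs (w : Int) (a : List (List String)) (out : Bool) : Prop := out = prs_alt w a
instance (w : Int) (a : List (List String)) (out : Bool) : Decidable (Spec_prs w a out) := by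
  unfold Spec_prs; infer_instance

-- ===== CLAIM (what is proved, stated in full; the proofs are below) =====
def Claim_equal_prs : Prop :=
  ∀ (w : Int) (a : List (List String)), Dom_prs w a → Pre_prs w a → Spec_prs w a (prs w a)

-- ===== LEMMAS AND PROOFS =====

theorem prm1F_succ (k : Nat) (x y w : Int) (a : List (List String)) :
    prm1F (k + 1) x y w a =
      if x < 0 ∨ x > 6 ∨ y < 0 ∨ y > 6 ∨ cell a x y ≠ exp1 x then false
      else if y == 6 then true
      else if prm1F k (x + 1) (y + 1) w a then true
      else if prm1F k (x - 1) (y + 1) w a then true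
      else if prm1F k x (y + 2) w a then true
      else false := rfl

theorem prm2F_succ (k : Nat) (x y w : Int) (a : List (List String)) :
    prm2F (k + 1) x y w a =
      if x < 0 ∨ x > 6 ∨ y < 0 ∨ y > 6 ∨ cell a x y ≠ exp2 x then false
      else if x == 6 then true
      else if prm2F k (x + 1) (y + 1) w a then true
      else if prm2F k (x + 1) (y - 1) w a then true
      else if prm2F k (x + 2) y w a then true
      else false := rfl

theorem loopF1_cons (w : Int) (a : List (List String)) (fuel : Nat) (x y : Int)
    (rest : List (Int × Int)) :
    loopF1 w a (fuel + 1) ((x, y) :: rest) =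
      if x < 0 ∨ x > 6 ∨ y < 0 ∨ y > 6 then loopF1 w a fuel rest
      else if cell a x y ≠ exp1 x then loopF1 w a fuel rest
      else if y == 6 then true
      else loopF1 w a fuel ((x, y + 2) :: (x - 1, y + 1) :: (x + 1, y + 1) :: rest) := rfl

theorem loopF2_cons (w : Int) (a : List (List String)) (fuel : Nat) (x y : Int)
    (rest : List (Int × Int)) :
    loopF2 w a (fuel + 1) ((x, y) :: rest) =
      if x < 0 ∨ x > 6 ∨ y < 0 ∨ y > 6 then loopF2 w a fuel rest
      else if cell a x y ≠ exp2 x then loopF2 w a fuel rest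
      else if x == 6 then true
      else loopF2 w a fuel ((x + 2, y) :: (x + 1, y - 1) :: (x + 1, y + 1) :: rest) := rfl

-- any fuel above the (7 - y)-bounded recursion depth computes the same value
theorem prm1F_congr (w : Int) (a : List (List String)) :
    ∀ (k j : Nat) (x y : Int), (7 - y).toNat ≤ k → (7 - y).toNat ≤ j →
      prm1F (k + 1) x y w a = prm1F (j + 1) x y w a := by
  intro k
  induction k with
  | zero =>
    intro j x y hk hj
    have hy : y > 6 := by omega
    have hg : x < 0 ∨ x > 6 ∨ y < 0 ∨ y > 6 ∨ cell a x y ≠ exp1 x :=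
      Or.inr (Or.inr (Or.inr (Or.inl hy)))
    rw [prm1F_succ 0, prm1F_succ j, if_pos hg, if_pos hg]
  | succ k ih =>
    intro j x y hk hj
    rw [prm1F_succ (k + 1), prm1F_succ j]
    by_cases hg : x < 0 ∨ x > 6 ∨ y < 0 ∨ y > 6 ∨ cell a x y ≠ exp1 x
    · rw [if_pos hg, if_pos hg]
    · rw [if_neg hg, if_neg hg]
      by_cases h6 : (y == 6) = true
      · rw [if_pos h6, if_pos h6]
      · rw [if_neg h6, if_neg h6]
        have hy0 : ¬ y < 0 := fun h => hg (Or.inr (Or.inr (Or.inl h)))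
        have hy6 : ¬ y > 6 := fun h => hg (Or.inr (Or.inr (Or.inr (Or.inl h))))
        obtain ⟨j', rfl⟩ : ∃ j', j = j' + 1 := ⟨j - 1, by omega⟩
        rw [ih j' (x + 1) (y + 1) (by omega) (by omega),
            ih j' (x - 1) (y + 1) (by omega) (by omega),
            ih j' x (y + 2) (by omega) (by omega)]

theorem prm2F_congr (w : Int) (a : List (List String)) :
    ∀ (k j : Nat) (x y : Int), (7 - x).toNat ≤ k → (7 - x).toNat ≤ j →
      prm2F (k + 1) x y w a = prm2F (j + 1) x y w a := by
  intro k
  induction k with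
  | zero =>
    intro j x y hk hj
    have hx : x > 6 := by omega
    have hg : x < 0 ∨ x > 6 ∨ y < 0 ∨ y > 6 ∨ cell a x y ≠ exp2 x := Or.inr (Or.inl hx)
    rw [prm2F_succ 0, prm2F_succ j, if_pos hg, if_pos hg]
  | succ k ih =>
    intro j x y hk hj
    rw [prm2F_succ (k + 1), prm2F_succ j]
    by_cases hg : x < 0 ∨ x > 6 ∨ y < 0 ∨ y > 6 ∨ cell a x y ≠ exp2 x
    · rw [if_pos hg, if_pos hg]
    · rw [if_neg hg, if_neg hg]
      by_cases h6 : (x == 6) = true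
      · rw [if_pos h6, if_pos h6]
      · rw [if_neg h6, if_neg h6]
        have hx0 : ¬ x < 0 := fun h => hg (Or.inl h)
        have hx6 : ¬ x > 6 := fun h => hg (Or.inr (Or.inl h))
        obtain ⟨j', rfl⟩ : ∃ j', j = j' + 1 := ⟨j - 1, by omega⟩
        rw [ih j' (x + 1) (y + 1) (by omega) (by omega),
            ih j' (x + 1) (y - 1) (by omega) (by omega),
            ih j' (x + 2) y (by omega) (by omega)]

theorem prm1_15 (x y w : Int) (a : List (List String)) (h : (7 - y).toNat ≤ 14) :
    prm1F 15 x y w a = prm1 x y w a :=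
  prm1F_congr w a 14 15 x y h (by omega)

theorem prm2_15 (x y w : Int) (a : List (List String)) (h : (7 - x).toNat ≤ 14) :
    prm2F 15 x y w a = prm2 x y w a :=
  prm2F_congr w a 14 15 x y h (by omega)

theorem pvMeas1Tail (x y : Int) (rest : List (Int × Int)) :
    meas1 rest < meas1 ((x, y) :: rest) := by
  have hp : 0 < (4:ℕ) ^ (9 - y).toNat := Nat.pow_pos (by norm_num)
  simp only [meas1, List.map_cons, List.sum_cons]
  omega

theorem pvMeas1Push (x y : Int) (rest : List (Int × Int)) (h1 : 0 ≤ y) (h2 : y ≤ 6) :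
    meas1 ((x, y + 2) :: (x - 1, y + 1) :: (x + 1, y + 1) :: rest) < meas1 ((x, y) :: rest) := by
  simp only [meas1, List.map_cons, List.sum_cons]
  have e1 : (4:ℕ) ^ (9 - y).toNat = 4 * 4 ^ (9 - (y + 1)).toNat := by
    have h : (9 - (y + 1)).toNat + 1 = (9 - y).toNat := by omega
    rw [← h, pow_succ]; ring
  have e2 : (4:ℕ) ^ (9 - (y + 1)).toNat = 4 * 4 ^ (9 - (y + 2)).toNat := by
    have h : (9 - (y + 2)).toNat + 1 = (9 - (y + 1)).toNat := by omega
    rw [← h, pow_succ]; ring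
  have hp : 0 < (4:ℕ) ^ (9 - (y + 2)).toNat := Nat.pow_pos (by norm_num)
  omega

theorem pvMeas2Tail (x y : Int) (rest : List (Int × Int)) :
    meas2 rest < meas2 ((x, y) :: rest) := by
  have hp : 0 < (4:ℕ) ^ (9 - x).toNat := Nat.pow_pos (by norm_num)
  simp only [meas2, List.map_cons, List.sum_cons]
  omega

theorem pvMeas2Push (x y : Int) (rest : List (Int × Int)) (h1 : 0 ≤ x) (h2 : x ≤ 6) :
    meas2 ((x + 2, y) :: (x + 1, y - 1) :: (x + 1, y + 1) :: rest) < meas2 ((x, y) :: rest) := by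
  simp only [meas2, List.map_cons, List.sum_cons]
  have e1 : (4:ℕ) ^ (9 - x).toNat = 4 * 4 ^ (9 - (x + 1)).toNat := by
    have h : (9 - (x + 1)).toNat + 1 = (9 - x).toNat := by omega
    rw [← h, pow_succ]; ring
  have e2 : (4:ℕ) ^ (9 - (x + 1)).toNat = 4 * 4 ^ (9 - (x + 2)).toNat := by
    have h : (9 - (x + 2)).toNat + 1 = (9 - (x + 1)).toNat := by omega
    rw [← h, pow_succ]; ring
  have hp : 0 < (4:ℕ) ^ (9 - (x + 2)).toNat := Nat.pow_pos (by norm_num)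
  omega

-- with enough fuel the stack loop returns true iff some stacked cell starts an accepted path
theorem loopF1_any (w : Int) (a : List (List String)) :
    ∀ (fuel : Nat) (s : List (Int × Int)), meas1 s < fuel →
      loopF1 w a fuel s = s.any (fun p => prm1 p.1 p.2 w a) := by
  intro fuel
  induction fuel with
  | zero => intro s h; omega
  | succ fuel ih =>
    intro s h
    match s with
    | [] => rfl
    | (x, y) :: rest =>
      rw [loopF1_cons]
      by_cases h1 : x < 0 ∨ x > 6 ∨ y < 0 ∨ y > 6
      · rw [if_pos h1, ih rest (by have := pvMeas1Tail x y rest; omega)]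
        have hg : x < 0 ∨ x > 6 ∨ y < 0 ∨ y > 6 ∨ cell a x y ≠ exp1 x := by tauto
        have hp : prm1 x y w a = false := by
          rw [prm1, prm1F_succ, if_pos hg]
        simp [hp]
      · rw [if_neg h1]
        by_cases h2 : cell a x y ≠ exp1 x
        · rw [if_pos h2, ih rest (by have := pvMeas1Tail x y rest; omega)]
          have hg : x < 0 ∨ x > 6 ∨ y < 0 ∨ y > 6 ∨ cell a x y ≠ exp1 x := by tauto
          have hp : prm1 x y w a = false := by
            rw [prm1, prm1F_succ, if_pos hg]
          simp [hp]
        · rw [if_neg h2]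
          have hg : ¬ (x < 0 ∨ x > 6 ∨ y < 0 ∨ y > 6 ∨ cell a x y ≠ exp1 x) := by tauto
          by_cases h3 : (y == 6) = true
          · rw [if_pos h3]
            have hp : prm1 x y w a = true := by
              rw [prm1, prm1F_succ, if_neg hg, if_pos h3]
            simp [hp]
          · rw [if_neg h3]
            rw [ih ((x, y + 2) :: (x - 1, y + 1) :: (x + 1, y + 1) :: rest)
              (by have := pvMeas1Push x y rest (by omega) (by omega); omega)]
            have hp : prm1 x y w a =
                (prm1 (x + 1) (y + 1) w a || (prm1 (x - 1) (y + 1) w a || prm1 x (y + 2) w a)) := by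
              rw [prm1, prm1F_succ, if_neg hg, if_neg h3,
                  prm1_15 (x + 1) (y + 1) w a (by omega),
                  prm1_15 (x - 1) (y + 1) w a (by omega),
                  prm1_15 x (y + 2) w a (by omega)]
              cases prm1 (x + 1) (y + 1) w a <;> cases prm1 (x - 1) (y + 1) w a <;>
                cases prm1 x (y + 2) w a <;> simp
            simp only [List.any_cons, hp]
            cases prm1 (x + 1) (y + 1) w a <;> cases prm1 (x - 1) (y + 1) w a <;>
              cases prm1 x (y + 2) w a <;> simp

theorem loopF2_any (w : Int) (a : List (List String)) :
    ∀ (fuel : Nat) (s : List (Int × Int)), meas2 s < fuel →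
      loopF2 w a fuel s = s.any (fun p => prm2 p.1 p.2 w a) := by
  intro fuel
  induction fuel with
  | zero => intro s h; omega
  | succ fuel ih =>
    intro s h
    match s with
    | [] => rfl
    | (x, y) :: rest =>
      rw [loopF2_cons]
      by_cases h1 : x < 0 ∨ x > 6 ∨ y < 0 ∨ y > 6
      · rw [if_pos h1, ih rest (by have := pvMeas2Tail x y rest; omega)]
        have hg : x < 0 ∨ x > 6 ∨ y < 0 ∨ y > 6 ∨ cell a x y ≠ exp2 x := by tauto
        have hp : prm2 x y w a = false := by
          rw [prm2, prm2F_succ, if_pos hg]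
        simp [hp]
      · rw [if_neg h1]
        by_cases h2 : cell a x y ≠ exp2 x
        · rw [if_pos h2, ih rest (by have := pvMeas2Tail x y rest; omega)]
          have hg : x < 0 ∨ x > 6 ∨ y < 0 ∨ y > 6 ∨ cell a x y ≠ exp2 x := by tauto
          have hp : prm2 x y w a = false := by
            rw [prm2, prm2F_succ, if_pos hg]
          simp [hp]
        · rw [if_neg h2]
          have hg : ¬ (x < 0 ∨ x > 6 ∨ y < 0 ∨ y > 6 ∨ cell a x y ≠ exp2 x) := by tauto
          by_cases h3 : (x == 6) = true
          · rw [if_pos h3]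
            have hp : prm2 x y w a = true := by
              rw [prm2, prm2F_succ, if_neg hg, if_pos h3]
            simp [hp]
          · rw [if_neg h3]
            rw [ih ((x + 2, y) :: (x + 1, y - 1) :: (x + 1, y + 1) :: rest)
              (by have := pvMeas2Push x y rest (by omega) (by omega); omega)]
            have hp : prm2 x y w a =
                (prm2 (x + 1) (y + 1) w a || (prm2 (x + 1) (y - 1) w a || prm2 (x + 2) y w a)) := by
              rw [prm2, prm2F_succ, if_neg hg, if_neg h3,
                  prm2_15 (x + 1) (y + 1) w a (by omega),
                  prm2_15 (x + 1) (y - 1) w a (by omega),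
                  prm2_15 (x + 2) y w a (by omega)]
              cases prm2 (x + 1) (y + 1) w a <;> cases prm2 (x + 1) (y - 1) w a <;>
                cases prm2 (x + 2) y w a <;> simp
            simp only [List.any_cons, hp]
            cases prm2 (x + 1) (y + 1) w a <;> cases prm2 (x + 1) (y - 1) w a <;>
              cases prm2 (x + 2) y w a <;> simp

theorem any_filter_map {α β : Type} (l : List α) (p : α → Bool) (f : α → β) (q : β → Bool) :
    (((l.filter p).map f).any q = l.any (fun x => p x && q (f x))) := by
  induction l with
  | nil => rfl
  | cons x xs ih =>
    by_cases h : p x = true <;> simp [h, ih]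

theorem prs_eq (w : Int) (a : List (List String)) : prs w a = prs_alt w a := by
  by_cases h1 : w = 1
  · subst h1
    simp only [prs, prs_alt]
    rw [loopF1_any 1 a _ _ (by omega), List.any_reverse, any_filter_map]
    simp
  · by_cases h2 : w = 2
    · subst h2
      simp only [prs, prs_alt]
      rw [loopF2_any 2 a _ _ (by omega), List.any_reverse, any_filter_map]
      simp
    · simp [prs, prs_alt, h1, h2]

-- ===== VERDICT (by name: the statement is the Claim_ definition above) =====
theorem prs_spec : Claim_equal_prs := by
  intro w a _ _
  unfold Spec_prs
  exact prs_eq w a
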